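-- pv_equiv track=rewrite | github.com/zhuyanhuazhuyanhua-crypto/3D_calibrate | src/reconstruction/semantic_enrichment.py | _smooth_vertex_labels
-- ===== SOURCE A (Python) =====
-- def _smooth_vertex_labels(classes, adjacency, iterations: int = 1):
--     """Smooth labels by majority vote within vertex neighborhood."""
--     import collections
--     labels = list(classes)
--     for _ in range(iterations):
--         new_labels = labels.copy()
--         for i, neigh in enumerate(adjacency):
--             counts = collections.Counter()
--             counts[labels[i]] += 1
--             for j in neigh:
--                 counts[labels[j]] += 1
--             # choose majority, tie-breaker smallest id
--             best = max(sorted(counts.items(), key=lambda x: x[0]), key=lambda x: x[1])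
--             new_labels[i] = best[0]
--         labels = new_labels
--     return labels
-- ===== SOURCE B (Python) =====
-- def _smooth_vertex_labels(classes, adjacency, iterations: int = 1):
--     """Smooth labels by majority vote within vertex neighborhood.
--
--     Sort-then-scan: per vertex, sort the neighborhood labels (own label
--     included) and pick the label of the longest run; a strict '>' update
--     over the ascending list makes the smallest label win ties."""
--     labels = list(classes)
--     for _ in range(iterations):
--         new_labels = labels.copy()
--         for i, neigh in enumerate(adjacency):
--             vals = sorted([labels[i]] + [labels[j] for j in neigh])
--             best_label, best_len = vals[0], 0
--             cur_label, cur_len = None, 0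
--             for v in vals:
--                 cur_len = cur_len + 1 if cur_label == v else 1
--                 cur_label = v
--                 if cur_len > best_len:
--                     best_label, best_len = v, cur_len
--             new_labels[i] = best_label
--         labels = new_labels
--     return labels
-- ===== Notes on version B (the rewrite author's own statement) =====
-- stated objective: alternative
-- what changed: Per vertex, the Counter hash-count plus sorted(items)+max argmax is replaced by sorting the neighborhood labels (own label included) and a single run-length scan with strict '>' update, so the smallest label of the longest run wins exactly as in A; the outer iteration and read-old/write-new discipline are unchanged.
import Mathlib
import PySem

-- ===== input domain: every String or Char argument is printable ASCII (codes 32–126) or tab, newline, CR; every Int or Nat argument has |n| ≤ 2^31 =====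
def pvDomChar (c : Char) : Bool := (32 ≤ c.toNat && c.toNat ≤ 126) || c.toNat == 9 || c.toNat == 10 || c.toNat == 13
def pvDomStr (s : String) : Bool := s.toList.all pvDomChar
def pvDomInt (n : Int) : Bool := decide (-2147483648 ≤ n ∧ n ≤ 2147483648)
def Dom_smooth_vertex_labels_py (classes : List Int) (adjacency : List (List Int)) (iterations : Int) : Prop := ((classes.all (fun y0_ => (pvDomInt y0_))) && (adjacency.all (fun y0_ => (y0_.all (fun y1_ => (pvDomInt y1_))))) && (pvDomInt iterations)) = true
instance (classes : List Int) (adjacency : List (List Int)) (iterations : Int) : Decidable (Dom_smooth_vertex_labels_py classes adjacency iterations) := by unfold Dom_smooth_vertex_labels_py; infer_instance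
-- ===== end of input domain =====

-- B replaces A's per-vertex Counter + sorted-items + argmax with a sort-then-scan
-- longest-run (mode) computation over the neighborhood labels; objective: alternative.

-- ===== PORT A =====
-- labels[k] (possibly negative Python index); total form, valid under Pre_ (index in range)
def pvLabel (labels : List Int) (k : Int) : Int := PySem.List.pyGetD labels k 0

-- counts = Counter(); counts[labels[i]] += 1; for j in neigh: counts[labels[j]] += 1;
-- best = max(sorted(counts.items(), key=lambda x: x[0]), key=lambda x: x[1]); best[0]
def pvBestA (labels : List Int) (i : Int) (neigh : List Int) : Int :=
  let counts0 := (PySem.Dict.empty : PySem.Dict Int Int).modify (pvLabel labels i) 0 (· + 1)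
  let counts := neigh.foldl (fun d j => d.modify (pvLabel labels j) 0 (· + 1)) counts0
  (((PySem.List.max? (PySem.List.sorted counts.items (fun p => p.1) false) (fun p => p.2)).map (fun p => p.1)).getD 0)

def smooth_vertex_labels_py (classes : List Int) (adjacency : List (List Int)) (iterations : Int) : List Int :=
  (PySem.List.pyRange 0 iterations 1).foldl
    (fun labels _ =>
      (PySem.List.enumerate adjacency 0).foldl
        (fun new_labels p => PySem.List.pySetD new_labels p.1 (pvBestA labels p.1 p.2))
        labels)
    classes

-- ===== PORT B =====
-- one step of Source B's run-length scan; state (best_label, best_len, cur_label, cur_len)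
def pvStep (s : Int × Int × Option Int × Int) (v : Int) : Int × Int × Option Int × Int :=
  let cn : Int := if s.2.2.1 == some v then s.2.2.2 + 1 else 1
  if cn > s.2.1 then (v, cn, some v, cn) else (s.1, s.2.1, some v, cn)

-- vals = sorted([labels[i]] + [labels[j] for j in neigh]); scan runs, strict '>' update
def pvBestB (labels : List Int) (i : Int) (neigh : List Int) : Int :=
  let vals := PySem.List.sorted (pvLabel labels i :: neigh.map (fun j => pvLabel labels j)) (fun x => x) false
  (vals.foldl pvStep (PySem.List.pyGetD vals 0 0, (0 : Int), (none : Option Int), (0 : Int))).1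

def smooth_vertex_labels_py_alt (classes : List Int) (adjacency : List (List Int)) (iterations : Int) : List Int :=
  (PySem.List.pyRange 0 iterations 1).foldl
    (fun labels _ =>
      (PySem.List.enumerate adjacency 0).foldl
        (fun new_labels p => PySem.List.pySetD new_labels p.1 (pvBestB labels p.1 p.2))
        labels)
    classes

-- ===== PRECONDITION & SPEC =====
-- Pre_ excludes exactly the inputs where the Python raises IndexError: when the loop
-- body runs at all (iterations > 0), every vertex position of adjacency must index into
-- classes, and every neighbor index must be in range (negative Python indices allowed).
def Pre_smooth_vertex_labels_py (classes : List Int) (adjacency : List (List Int)) (iterations : Int) : Prop :=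
  iterations ≤ 0 ∨
    (adjacency.length ≤ classes.length ∧
      ∀ neigh ∈ adjacency, ∀ j ∈ neigh, PySem.Raise.InRange classes.length j)
instance (classes : List Int) (adjacency : List (List Int)) (iterations : Int) : Decidable (Pre_smooth_vertex_labels_py classes adjacency iterations) := by unfold Pre_smooth_vertex_labels_py; infer_instance
def pvWitness_smooth_vertex_labels_py : List Int × List (List Int) × Int := ([1, 2, 2], [[1, 2], [0], [-1, 0]], 2)

def Spec_smooth_vertex_labels_py (classes : List Int) (adjacency : List (List Int)) (iterations : Int) (out : List Int) : Prop := out = smooth_vertex_labels_py_alt classes adjacency iterations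
instance (classes : List Int) (adjacency : List (List Int)) (iterations : Int) (out : List Int) : Decidable (Spec_smooth_vertex_labels_py classes adjacency iterations out) := by unfold Spec_smooth_vertex_labels_py; infer_instance

-- ===== CLAIM (what is proved, stated in full; the proofs are below) =====
def Claim_equal_smooth_vertex_labels_py : Prop := ∀ (classes : List Int) (adjacency : List (List Int)) (iterations : Int), Dom_smooth_vertex_labels_py classes adjacency iterations → Pre_smooth_vertex_labels_py classes adjacency iterations → Spec_smooth_vertex_labels_py classes adjacency iterations (smooth_vertex_labels_py classes adjacency iterations)

-- ===== LEMMAS AND PROOFS =====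

def pvInv (S : List Int) (r : Int × Int × Option Int × Int) : Prop :=
  r.1 ∈ S ∧ r.2.1 = (S.count r.1 : Int) ∧
  (∀ w ∈ S, S.count w ≤ S.count r.1) ∧
  (∀ w ∈ S, S.count w = S.count r.1 → r.1 ≤ w) ∧
  ∃ t, r.2.2.1 = some t ∧ t ∈ S ∧ (∀ w ∈ S, w ≤ t) ∧ r.2.2.2 = (S.count t : Int)

lemma pvMaxFold_first : ∀ (P : List (Int × Int)) (acc mm : Int × Int),
    PySem.List.max? (acc :: P) (fun p => p.2) = some mm →
    List.Pairwise (fun a b => a.1 < b.1) (acc :: P) →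
    ((mm = acc ∨ mm ∈ P) ∧ acc.2 ≤ mm.2 ∧ (∀ p ∈ P, p.2 ≤ mm.2) ∧
      (∀ p, (p = acc ∨ p ∈ P) → p.2 = mm.2 → mm.1 ≤ p.1)) := by
  intro P
  induction P with
  | nil =>
    intro acc mm hm _
    have : some acc = some mm := hm
    cases this; simp
  | cons x rest ih =>
    intro acc mm hm hpw
    have hacc : ∀ a' ∈ x :: rest, acc.1 < a'.1 := (List.pairwise_cons.mp hpw).1
    have hpw' : List.Pairwise (fun a b : Int × Int => a.1 < b.1) (x :: rest) :=
      (List.pairwise_cons.mp hpw).2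
    have hstep : PySem.List.max? (acc :: x :: rest) (fun p => p.2) =
        PySem.List.max? ((if acc.2 < x.2 then x else acc) :: rest) (fun p => p.2) := by
      unfold PySem.List.max?
      simp only [List.foldl_cons]
      by_cases h : acc.2 < x.2 <;> simp [h]
    rw [hstep] at hm
    by_cases hlt : acc.2 < x.2
    · rw [if_pos hlt] at hm
      obtain ⟨hmem, hle, hall, hfirst⟩ := ih x mm hm hpw'
      refine ⟨?_, by omega, ?_, ?_⟩
      · rcases hmem with h | h
        · exact Or.inr (h ▸ List.mem_cons_self)
        · exact Or.inr (List.mem_cons_of_mem _ h)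
      · intro p hp
        rcases List.mem_cons.mp hp with h | h
        · subst h; exact hle
        · exact hall p h
      · intro p hp hpe
        rcases hp with rfl | hp
        · omega
        · rcases List.mem_cons.mp hp with h | h
          · exact hfirst p (Or.inl h) hpe
          · exact hfirst p (Or.inr h) hpe
    · rw [if_neg hlt] at hm
      obtain ⟨hmem, hle, hall, hfirst⟩ := ih acc mm hm (by
        rw [List.pairwise_cons]
        exact ⟨fun b hb => hacc b (List.mem_cons_of_mem _ hb),
          (List.pairwise_cons.mp hpw').2⟩)
      refine ⟨?_, hle, ?_, ?_⟩
      · rcases hmem with h | h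
        · exact Or.inl h
        · exact Or.inr (List.mem_cons_of_mem _ h)
      · intro p hp
        rcases List.mem_cons.mp hp with h | h
        · subst h; omega
        · exact hall p h
      · intro p hp hpe
        rcases hp with rfl | hp
        · exact hfirst p (Or.inl rfl) hpe
        · rcases List.mem_cons.mp hp with h | h
          · subst h
            have h1 : mm.1 ≤ acc.1 := hfirst acc (Or.inl rfl) (by omega)
            have h2 : acc.1 < p.1 := hacc p List.mem_cons_self
            omega
          · exact hfirst p (Or.inr h) hpe

lemma pvMax_first {P : List (Int × Int)} {m : Int × Int}
    (hm : PySem.List.max? P (fun p => p.2) = some m)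
    (hP : List.Pairwise (fun a b => a.1 < b.1) P) :
    m ∈ P ∧ (∀ p ∈ P, p.2 ≤ m.2) ∧ (∀ p ∈ P, p.2 = m.2 → m.1 ≤ p.1) := by
  cases P with
  | nil => simp [PySem.List.max?] at hm
  | cons q rest =>
    obtain ⟨hmem, hle, hall, hfirst⟩ := pvMaxFold_first rest q m hm hP
    refine ⟨?_, ?_, ?_⟩
    · rcases hmem with h | h
      · exact h ▸ List.mem_cons_self
      · exact List.mem_cons_of_mem _ h
    · intro p hp
      rcases List.mem_cons.mp hp with h | h
      · subst h; exact hle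
      · exact hall p h
    · intro p hp hpe
      rcases List.mem_cons.mp hp with h | h
      · exact hfirst p (Or.inl h) hpe
      · exact hfirst p (Or.inr h) hpe

lemma pvcount_append (T : List Int) (v w : Int) :
    (T ++ [v]).count w = T.count w + if w = v then 1 else 0 := by
  simp only [List.count_append, List.count_singleton']
  congr 1
  simp [eq_comm]

-- the chosen label characterized on the bag L of neighborhood labels
def pvChar (L : List Int) (v : Int) : Prop :=
  v ∈ L ∧ (∀ w ∈ L, L.count w ≤ L.count v) ∧ (∀ w ∈ L, L.count w = L.count v → v ≤ w)

lemma pvScan_inv : ∀ (S : List Int), S.Pairwise (· ≤ ·) → S ≠ [] → ∀ (b0 : Int),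
    pvInv S (S.foldl pvStep (b0, (0 : Int), (none : Option Int), (0 : Int))) := by
  intro S
  induction S using List.reverseRecOn with
  | nil => intro _ h; exact absurd rfl h
  | append_singleton T v ih =>
    intro hpw _ b0
    rcases List.pairwise_append.mp hpw with ⟨hpwT, -, hTv⟩
    have hTv' : ∀ w ∈ T, w ≤ v := fun w hw => hTv w hw v (List.mem_singleton_self v)
    rcases eq_or_ne T [] with rfl | hT
    · simp [pvInv, pvStep]
    · have hfold : (T ++ [v]).foldl pvStep (b0, (0:Int), (none : Option Int), (0:Int)) =
        pvStep (T.foldl pvStep (b0, (0:Int), (none : Option Int), (0:Int))) v := by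
        rw [List.foldl_append]; rfl
      rw [hfold]
      obtain ⟨hmem, hbn, hmax, htie, t, hcl, htmem, htmax, hcn⟩ := ih hpwT hT b0
      set r := T.foldl pvStep (b0, (0:Int), (none : Option Int), (0:Int)) with hr
      have hblT : 0 < T.count r.1 := List.count_pos_iff.mpr hmem
      by_cases hvt : t = v
      · -- the new element extends the current run
        subst hvt
        have hcv : (T ++ [t]).count t = T.count t + 1 := by rw [pvcount_append]; simp
        have hcw : ∀ w, w ≠ t → (T ++ [t]).count w = T.count w := by
          intro w hw; rw [pvcount_append]; simp [hw]
        have hstep : pvStep r t =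
            if ((T.count t : Int) + 1 > r.2.1) then (t, (T.count t:Int) + 1, some t, (T.count t:Int) + 1)
            else (r.1, r.2.1, some t, (T.count t:Int) + 1) := by
          simp only [pvStep, hcl, hcn, BEq.rfl, if_pos]
        by_cases hgt : (T.count t : Int) + 1 > r.2.1
        · rw [hstep, if_pos hgt]
          refine ⟨by simp, by simp [hcv], ?_, ?_, t, rfl, by simp, ?_, by simp [hcv]⟩
          · intro w hw
            by_cases hwt : w = t
            · subst hwt; dsimp only; omega
            · rw [hcw w hwt, hcv]
              have := List.count_pos_iff.mpr ((List.mem_append.mp hw).resolve_right (by simp [hwt]))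
              have := hmax w ((List.mem_append.mp hw).resolve_right (by simp [hwt]))
              omega
          · intro w hw hcnt
            by_cases hwt : w = t
            · omega
            · exfalso
              rw [hcw w hwt, hcv] at hcnt
              have := hmax w ((List.mem_append.mp hw).resolve_right (by simp [hwt]))
              omega
          · intro w hw
            rcases List.mem_append.mp hw with h | h
            · exact hTv' w h
            · simp at h; omega
        · rw [hstep, if_neg hgt]
          have hblne : r.1 ≠ t := by
            intro h; rw [h] at hbn; omega
          have hcbl : (T ++ [t]).count r.1 = T.count r.1 := hcw _ hblne
          refine ⟨by simp [hmem], by simp [hcbl, hbn], ?_, ?_, t, rfl, by simp, ?_, by simp [hcv]⟩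
          · intro w hw
            by_cases hwt : w = t
            · subst hwt; rw [hcv, hcbl]; omega
            · rw [hcw w hwt, hcbl]
              exact hmax w ((List.mem_append.mp hw).resolve_right (by simp [hwt]))
          · intro w hw hcnt
            by_cases hwt : w = t
            · subst hwt; exact hTv' r.1 hmem
            · rw [hcw w hwt, hcbl] at hcnt
              exact htie w ((List.mem_append.mp hw).resolve_right (by simp [hwt])) hcnt
          · intro w hw
            rcases List.mem_append.mp hw with h | h
            · exact hTv' w h
            · simp at h; omega
      · -- new, strictly larger label: run restarts at length 1
        have hvT : v ∉ T := by
          intro hvmem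
          exact hvt (le_antisymm (hTv' t htmem) (htmax v hvmem))
        have hcv : (T ++ [v]).count v = 1 := by
          rw [pvcount_append]; simp [List.count_eq_zero_of_not_mem hvT]
        have hcw : ∀ w, w ≠ v → (T ++ [v]).count w = T.count w := by
          intro w hw; rw [pvcount_append]; simp [hw]
        have hblne : r.1 ≠ v := fun h => hvT (h ▸ hmem)
        have hstep : pvStep r v = (r.1, r.2.1, some v, (1:Int)) := by
          have h1 : (some t == some v) = false := by simp [hvt]
          simp only [pvStep, hcl, h1, Bool.false_eq_true, if_false, gt_iff_lt]
          rw [if_neg (by omega)]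
        rw [hstep]
        refine ⟨by simp [hmem], by simp [hcw _ hblne, hbn], ?_, ?_, v, rfl, by simp, ?_, by simp [hcv]⟩
        · intro w hw
          by_cases hwv : w = v
          · subst hwv; rw [hcv, hcw _ hblne]; omega
          · rw [hcw w hwv, hcw _ hblne]
            exact hmax w ((List.mem_append.mp hw).resolve_right (by simp [hwv]))
        · intro w hw hcnt
          by_cases hwv : w = v
          · subst hwv; exact hTv' r.1 hmem
          · rw [hcw w hwv, hcw _ hblne] at hcnt
            exact htie w ((List.mem_append.mp hw).resolve_right (by simp [hwv])) hcnt
        · intro w hw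
          rcases List.mem_append.mp hw with h | h
          · exact hTv' w h
          · simp at h; omega

lemma pvPick_unique {L : List Int} {v1 v2 : Int}
    (h1 : v1 ∈ L ∧ (∀ w ∈ L, L.count w ≤ L.count v1) ∧ (∀ w ∈ L, L.count w = L.count v1 → v1 ≤ w))
    (h2 : v2 ∈ L ∧ (∀ w ∈ L, L.count w ≤ L.count v2) ∧ (∀ w ∈ L, L.count w = L.count v2 → v2 ≤ w)) :
    v1 = v2 := by
  obtain ⟨m1, le1, tie1⟩ := h1
  obtain ⟨m2, le2, tie2⟩ := h2
  have hc : L.count v1 = L.count v2 := le_antisymm (le2 v1 m1) (le1 v2 m2)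
  exact le_antisymm (tie1 v2 m2 (by omega)) (tie2 v1 m1 (by omega))

lemma pvBest_eq (labels : List Int) (i : Int) (neigh : List Int) :
    pvBestA labels i neigh = pvBestB labels i neigh := by
  set L : List Int := pvLabel labels i :: neigh.map (fun j => pvLabel labels j) with hL
  have hLne : L ≠ [] := by simp [hL]
  -- A side
  have hcounts : (neigh.foldl (fun d j => d.modify (pvLabel labels j) 0 (· + 1))
      ((PySem.Dict.empty : PySem.Dict Int Int).modify (pvLabel labels i) 0 (· + 1)))
      = PySem.Dict.counter L := by
    rw [PySem.Dict.counter_eq_foldl, hL, List.foldl_cons, List.foldl_map]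
  set P := PySem.List.sorted (PySem.Dict.counter L).items (fun p => p.1) false with hP
  have hitems := PySem.Dict.items_counter L
  have hperm : P.Perm (PySem.Dict.counter L).items := PySem.List.sorted_perm _ _ _
  have hple : P.Pairwise (fun a b => a.1 ≤ b.1) := PySem.List.sorted_pairwise _ _
  have hfst : (P.map (fun p => p.1)).Nodup := by
    refine (List.Perm.nodup_iff (List.Perm.map _ hperm)).mpr ?_
    rw [hitems, List.map_map]
    have hid : ((fun p : Int × Int => p.1) ∘ (fun k : Int => (k, (L.count k : Int)))) = id := rfl
    rw [hid, List.map_id]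
    exact PySem.Set.nodup_ofList L
  have hplt : P.Pairwise (fun a b : Int × Int => a.1 < b.1) := by
    have hne : P.Pairwise (fun a b : Int × Int => a.1 ≠ b.1) := List.pairwise_map.mp hfst
    exact (hple.and hne).imp (fun h => lt_of_le_of_ne h.1 h.2)
  have hPne : P ≠ [] := by
    rw [hP, Ne, PySem.List.sorted_eq_nil_iff, hitems]
    intro h
    have : pvLabel labels i ∈ PySem.Set.ofList L := by
      rw [PySem.Set.mem_ofList]; simp [hL]
    simp [List.map_eq_nil_iff.mp h] at this
  obtain ⟨m, hm⟩ : ∃ m, PySem.List.max? P (fun p => p.2) = some m := by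
    cases h : PySem.List.max? P (fun p => p.2) with
    | none => exact absurd ((PySem.List.max?_eq_none_iff _ _).mp h) hPne
    | some m => exact ⟨m, rfl⟩
  obtain ⟨hmmem, hmmax, hmfirst⟩ := pvMax_first hm hplt
  have hmemP : ∀ p, p ∈ P ↔ ∃ k, k ∈ L ∧ p = (k, (L.count k : Int)) := by
    intro p
    rw [hperm.mem_iff, hitems, List.mem_map]
    constructor
    · rintro ⟨k, hk, rfl⟩; exact ⟨k, (PySem.Set.mem_ofList _ _).mp hk, rfl⟩
    · rintro ⟨k, hk, rfl⟩; exact ⟨k, (PySem.Set.mem_ofList _ _).mpr hk, rfl⟩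
  obtain ⟨k0, hk0L, hk0⟩ := (hmemP m).mp hmmem
  have hm1 : m.1 = k0 := by rw [hk0]
  have hm2 : m.2 = (L.count m.1 : Int) := by rw [hm1, hk0]
  have hcharA : pvChar L m.1 := by
    refine ⟨hm1 ▸ hk0L, ?_, ?_⟩
    · intro w hw
      have h := hmmax (w, (L.count w : Int)) ((hmemP _).mpr ⟨w, hw, rfl⟩)
      rw [hm2] at h
      simp only [] at h
      exact_mod_cast h
    · intro w hw hcnt
      have h := hmfirst (w, (L.count w : Int)) ((hmemP _).mpr ⟨w, hw, rfl⟩)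
        (by show (L.count w : Int) = m.2; rw [hm2, hcnt])
      exact h
  -- B side
  set S := PySem.List.sorted L (fun x => x) false with hS
  have hSperm : S.Perm L := PySem.List.sorted_perm _ _ _
  have hSle : S.Pairwise (· ≤ ·) := PySem.List.sorted_pairwise _ _
  have hSne : S ≠ [] := by rw [hS, Ne, PySem.List.sorted_eq_nil_iff]; exact hLne
  obtain ⟨hrmem, hrbn, hrmax, hrtie, -⟩ := pvScan_inv S hSle hSne (PySem.List.pyGetD S 0 0)
  set r := S.foldl pvStep (PySem.List.pyGetD S 0 0, (0:Int), (none : Option Int), (0:Int)) with hr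
  have hcharB : pvChar L r.1 := by
    refine ⟨hSperm.mem_iff.mp hrmem, ?_, ?_⟩
    · intro w hw
      have := hrmax w (hSperm.mem_iff.mpr hw)
      rwa [hSperm.count_eq, hSperm.count_eq] at this
    · intro w hw hcnt
      exact hrtie w (hSperm.mem_iff.mpr hw) (by rwa [hSperm.count_eq, hSperm.count_eq])
  -- combine
  have : m.1 = r.1 := pvPick_unique hcharA hcharB
  show pvBestA labels i neigh = pvBestB labels i neigh
  simp only [pvBestA, pvBestB]
  rw [hcounts, ← hP, ← hL, ← hS, hm, ← hr]
  simpa using this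

-- the per-vertex choices agree, hence the whole iteration folds agree
theorem pv_main : ∀ (classes : List Int) (adjacency : List (List Int)) (iterations : Int),
    smooth_vertex_labels_py classes adjacency iterations = smooth_vertex_labels_py_alt classes adjacency iterations := by
  intro classes adjacency iterations
  unfold smooth_vertex_labels_py smooth_vertex_labels_py_alt
  simp only [pvBest_eq]

-- ===== VERDICT (by name: the statement is the Claim_ definition above) =====
theorem smooth_vertex_labels_py_spec : Claim_equal_smooth_vertex_labels_py := by
  intro classes adjacency iterations _ _
  unfold Spec_smooth_vertex_labels_py
  exact pv_main classes adjacency iterations
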